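-- pv_equiv track=rewrite | github.com/dingz212445/cit590-hw5_squarelotron | squarelotron.py | inverse_diagonal_flip
-- ===== SOURCE A (Python) =====
-- import copy
--
-- def inverse_diagonal_flip(squarelotron, ring):
--     fliped_squarelotron = copy.deepcopy(squarelotron)
--     if ring == 'o':
--         for i in range(0, 5):
--             fliped_squarelotron[0][i], fliped_squarelotron[4 - i][4] = \
--                                                fliped_squarelotron[4 - i][4], fliped_squarelotron[0][i]
--         for i in range(1, 5):
--             fliped_squarelotron[i][0], fliped_squarelotron[4][4 - i] = \
--                                                fliped_squarelotron[4][4 - i], fliped_squarelotron[i][0]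
--
--     elif ring == 'i':
--         for i in range(1, 4):
--             fliped_squarelotron[1][i], fliped_squarelotron[4 - i][3] = \
--                                                fliped_squarelotron[4 - i][3], fliped_squarelotron[1][i]
--         for i in range(2, 4):
--             fliped_squarelotron[i][1], fliped_squarelotron[3][4 - i] = \
--                                                fliped_squarelotron[3][4 - i], fliped_squarelotron[i][1]
--
--
--     return fliped_squarelotron
-- ===== SOURCE B (Python) =====
-- import copy
--
-- def inverse_diagonal_flip(squarelotron, ring):
--     result = copy.deepcopy(squarelotron)
--     if ring not in ('o', 'i'):
--         return result
--     want = 0 if ring == 'o' else 1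
--     for i in range(5):
--         for j in range(5):
--             if min(i, j, 4 - i, 4 - j) == want:
--                 result[i][j] = squarelotron[4 - j][4 - i]
--     return result
-- ===== Notes on version B (the rewrite author's own statement) =====
-- stated objective: simpler
-- what changed: Replaces A's two paired-swap loops per ring with one formula-driven pass over all 25 cells, writing the original grid's anti-diagonal mirror squarelotron[4-j][4-i] at each cell whose ring distance min(i,j,4-i,4-j) matches the selected ring.
import Mathlib
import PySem

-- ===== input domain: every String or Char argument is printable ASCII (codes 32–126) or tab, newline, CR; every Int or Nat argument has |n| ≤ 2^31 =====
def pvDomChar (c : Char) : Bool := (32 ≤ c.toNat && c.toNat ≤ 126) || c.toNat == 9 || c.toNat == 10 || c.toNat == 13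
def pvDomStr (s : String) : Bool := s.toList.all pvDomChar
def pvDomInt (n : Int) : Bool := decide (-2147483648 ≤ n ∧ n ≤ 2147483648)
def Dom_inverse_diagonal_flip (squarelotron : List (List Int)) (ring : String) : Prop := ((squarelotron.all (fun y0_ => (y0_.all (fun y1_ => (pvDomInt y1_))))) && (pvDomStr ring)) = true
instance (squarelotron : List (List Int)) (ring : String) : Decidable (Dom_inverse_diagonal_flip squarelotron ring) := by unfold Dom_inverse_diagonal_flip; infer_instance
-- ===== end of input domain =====

-- B replaces A's two paired-swap loops per ring with one pass over all 25 cells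
-- writing the original grid's anti-diagonal mirror at each cell of the selected ring (objective: simpler).

-- ===== PORT A =====
-- read cell (i,j); inside Pre_ every index used is in range, so the defaults are never taken
def pvGet2 (m : List (List Int)) (i j : Nat) : Int := (m.getD i []).getD j 0
-- write cell (i,j); inside Pre_ every index used is in range
def pvSet2 (m : List (List Int)) (i j : Nat) (v : Int) : List (List Int) :=
  m.set i ((m.getD i []).set j v)
-- Python's tuple swap: both reads first, then both writes (left to right)
def pvSwap (m : List (List Int)) (i j k l : Nat) : List (List Int) :=
  let a := pvGet2 m i j
  let b := pvGet2 m k l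
  pvSet2 (pvSet2 m i j b) k l a

def inverse_diagonal_flip (squarelotron : List (List Int)) (ring : String) : List (List Int) :=
  -- copy.deepcopy of a list of lists of ints = the same value
  let m := squarelotron
  if ring = "o" then
    let m := ([0, 1, 2, 3, 4] : List Nat).foldl (fun m i => pvSwap m 0 i (4 - i) 4) m
    ([1, 2, 3, 4] : List Nat).foldl (fun m i => pvSwap m i 0 4 (4 - i)) m
  else if ring = "i" then
    let m := ([1, 2, 3] : List Nat).foldl (fun m i => pvSwap m 1 i (4 - i) 3) m
    ([2, 3] : List Nat).foldl (fun m i => pvSwap m i 1 3 (4 - i)) m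
  else m

-- ===== PORT B =====
def inverse_diagonal_flip_alt (squarelotron : List (List Int)) (ring : String) : List (List Int) :=
  if ¬ (ring = "o" ∨ ring = "i") then squarelotron
  else
    let want : Nat := if ring = "o" then 0 else 1
    ([0, 1, 2, 3, 4] : List Nat).foldl (fun m i =>
      ([0, 1, 2, 3, 4] : List Nat).foldl (fun m j =>
        if min (min i j) (min (4 - i) (4 - j)) = want then
          pvSet2 m i j (pvGet2 squarelotron (4 - j) (4 - i))
        else m) m) squarelotron

-- ===== PRECONDITION & SPEC =====
-- Pre_ excludes exactly the inputs on which A raises IndexError: for ring 'o' A touches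
-- rows 0–4 at columns up to 4, for ring 'i' rows 1–3 at columns up to 3; any other ring is total.
def Pre_inverse_diagonal_flip (squarelotron : List (List Int)) (ring : String) : Prop :=
  (ring = "o" → 5 ≤ squarelotron.length ∧
    5 ≤ (squarelotron.getD 0 []).length ∧ 5 ≤ (squarelotron.getD 1 []).length ∧
    5 ≤ (squarelotron.getD 2 []).length ∧ 5 ≤ (squarelotron.getD 3 []).length ∧
    5 ≤ (squarelotron.getD 4 []).length) ∧
  (ring = "i" → 4 ≤ squarelotron.length ∧
    4 ≤ (squarelotron.getD 1 []).length ∧ 4 ≤ (squarelotron.getD 2 []).length ∧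
    4 ≤ (squarelotron.getD 3 []).length)
instance (squarelotron : List (List Int)) (ring : String) : Decidable (Pre_inverse_diagonal_flip squarelotron ring) := by unfold Pre_inverse_diagonal_flip; infer_instance

def pvWitness_inverse_diagonal_flip : List (List Int) × String :=
  ([[1, 2, 3, 4, 5], [6, 7, 8, 9, 10], [11, 12, 13, 14, 15], [16, 17, 18, 19, 20], [21, 22, 23, 24, 25]], "o")

def Spec_inverse_diagonal_flip (squarelotron : List (List Int)) (ring : String) (out : List (List Int)) : Prop := out = inverse_diagonal_flip_alt squarelotron ring
instance (squarelotron : List (List Int)) (ring : String) (out : List (List Int)) : Decidable (Spec_inverse_diagonal_flip squarelotron ring out) := by unfold Spec_inverse_diagonal_flip; infer_instance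

-- ===== CLAIM (what is proved, stated in full; the proofs are below) =====
def Claim_equal_inverse_diagonal_flip : Prop := ∀ (squarelotron : List (List Int)) (ring : String), Dom_inverse_diagonal_flip squarelotron ring → Pre_inverse_diagonal_flip squarelotron ring → Spec_inverse_diagonal_flip squarelotron ring (inverse_diagonal_flip squarelotron ring)

-- ===== LEMMAS AND PROOFS =====

lemma pvCons5 {α : Type} : ∀ (l : List α), 5 ≤ l.length → ∃ a b c d e t, l = a :: b :: c :: d :: e :: t
  | a :: b :: c :: d :: e :: t, _ => ⟨a, b, c, d, e, t, rfl⟩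
  | [], h => by simp at h
  | [_], h => by simp at h
  | [_, _], h => by simp at h
  | [_, _, _], h => by simp at h
  | [_, _, _, _], h => by simp at h

lemma pvCons4 {α : Type} : ∀ (l : List α), 4 ≤ l.length → ∃ a b c d t, l = a :: b :: c :: d :: t
  | a :: b :: c :: d :: t, _ => ⟨a, b, c, d, t, rfl⟩
  | [], h => by simp at h
  | [_], h => by simp at h
  | [_, _], h => by simp at h
  | [_, _, _], h => by simp at h

-- ===== VERDICT (by name: the statement is the Claim_ definition above) =====
theorem inverse_diagonal_flip_spec : Claim_equal_inverse_diagonal_flip := by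
  intro s ring _ hpre
  unfold Spec_inverse_diagonal_flip
  obtain ⟨ho, hi⟩ := hpre
  by_cases h0 : ring = "o"
  · subst h0
    obtain ⟨hn, h0, h1, h2, h3, h4⟩ := ho rfl
    obtain ⟨r0, r1, r2, r3, r4, t, rfl⟩ := pvCons5 s hn
    simp only [List.getD] at h0 h1 h2 h3 h4
    obtain ⟨a0, a1, a2, a3, a4, ta, rfl⟩ := pvCons5 r0 (by simpa using h0)
    obtain ⟨b0, b1, b2, b3, b4, tb, rfl⟩ := pvCons5 r1 (by simpa using h1)
    obtain ⟨c0, c1, c2, c3, c4, tc, rfl⟩ := pvCons5 r2 (by simpa using h2)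
    obtain ⟨d0, d1, d2, d3, d4, td, rfl⟩ := pvCons5 r3 (by simpa using h3)
    obtain ⟨e0, e1, e2, e3, e4, te, rfl⟩ := pvCons5 r4 (by simpa using h4)
    simp [inverse_diagonal_flip, inverse_diagonal_flip_alt, pvSwap, pvSet2, pvGet2]
  · by_cases h1 : ring = "i"
    · subst h1
      obtain ⟨hn, hb, hc, hd⟩ := hi rfl
      obtain ⟨r0, r1, r2, r3, t, rfl⟩ := pvCons4 s hn
      simp only [List.getD] at hb hc hd
      obtain ⟨b0, b1, b2, b3, tb, rfl⟩ := pvCons4 r1 (by simpa using hb)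
      obtain ⟨c0, c1, c2, c3, tc, rfl⟩ := pvCons4 r2 (by simpa using hc)
      obtain ⟨d0, d1, d2, d3, td, rfl⟩ := pvCons4 r3 (by simpa using hd)
      simp [inverse_diagonal_flip, inverse_diagonal_flip_alt, pvSwap, pvSet2, pvGet2]
    · simp [inverse_diagonal_flip, inverse_diagonal_flip_alt, h0, h1]
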